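-- pv_equiv track=rewrite | github.com/ashmere/docgenai | src/docgenai/structure/grouping.py | _classify_directory
-- ===== SOURCE A (Python) =====
-- from typing import Dict, List, Optional, Set, Tuple
--
-- def _classify_directory(dir_name: str) -> Tuple[str, str]:
--     """Classify directory type and architectural role."""
--     dir_lower = dir_name.lower()
--
--     # Test directories
--     if any(test in dir_lower for test in ["test", "tests", "spec", "__tests__"]):
--         return "test", "Test coverage and quality assurance"
--
--     # Configuration directories
--     if any(config in dir_lower for config in ["config", "conf", "settings", "env"]):
--         return "config", "Configuration and environment setup"
--
--     # Documentation directories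
--     if any(doc in dir_lower for doc in ["doc", "docs", "documentation"]):
--         return "config", "Project documentation and guides"
--
--     # Source code directories
--     if any(src in dir_lower for src in ["src", "source", "lib", "app"]):
--         return "core", "Core application source code"
--
--     # Component/feature directories
--     if any(
--         comp in dir_lower for comp in ["component", "feature", "module", "service"]
--     ):
--         return "feature", "Feature implementation and business logic"
--
--     # Utility directories
--     if any(
--         util in dir_lower
--         for util in ["util", "utils", "helper", "common", "shared"]
--     ):
--         return "infrastructure", "Utility functions and shared code"
--
--     # API directories
--     if any(api in dir_lower for api in ["api", "handler", "controller", "route"]):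
--         return "feature", "API endpoints and request handling"
--
--     # Model/data directories
--     if any(
--         data in dir_lower for data in ["model", "schema", "entity", "data", "db"]
--     ):
--         return "feature", "Data models and persistence layer"
--
--     # Infrastructure directories
--     if any(
--         infra in dir_lower
--         for infra in ["infra", "deploy", "docker", "k8s", "terraform"]
--     ):
--         return "infrastructure", "Infrastructure and deployment configuration"
--
--     # Default classification
--     return "feature", f"Functionality in the {dir_name} module"
-- ===== SOURCE B (Python) =====
-- # Single left-to-right scan over the lowered name: at each position, prefix-match
-- # against a keyword->rule-priority index and keep the minimum priority seen.
-- _RULE_GROUPS = [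
--     (["test", "tests", "spec", "__tests__"], ("test", "Test coverage and quality assurance")),
--     (["config", "conf", "settings", "env"], ("config", "Configuration and environment setup")),
--     (["doc", "docs", "documentation"], ("config", "Project documentation and guides")),
--     (["src", "source", "lib", "app"], ("core", "Core application source code")),
--     (["component", "feature", "module", "service"], ("feature", "Feature implementation and business logic")),
--     (["util", "utils", "helper", "common", "shared"], ("infrastructure", "Utility functions and shared code")),
--     (["api", "handler", "controller", "route"], ("feature", "API endpoints and request handling")),
--     (["model", "schema", "entity", "data", "db"], ("feature", "Data models and persistence layer")),
--     (["infra", "deploy", "docker", "k8s", "terraform"], ("infrastructure", "Infrastructure and deployment configuration")),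
-- ]
-- _KEYWORD_PRIORITY = {kw: idx for idx, (kws, _) in enumerate(_RULE_GROUPS) for kw in kws}
-- _RESULTS = [res for _, res in _RULE_GROUPS]
--
--
-- def _classify_directory(dir_name: str):
--     s = dir_name.lower()
--     best = len(_RESULTS)
--     for i in range(len(s)):
--         suffix = s[i:]
--         for kw, idx in _KEYWORD_PRIORITY.items():
--             if suffix.startswith(kw):
--                 best = min(best, idx)
--     if best < len(_RESULTS):
--         return _RESULTS[best]
--     return "feature", f"Functionality in the {dir_name} module"
-- ===== Notes on version B (the rewrite author's own statement) =====
-- stated objective: alternative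
-- what changed: Instead of A's ladder of per-keyword substring searches, B makes one left-to-right pass over the lowered name, prefix-matching a keyword-to-rule-priority index at every position and keeping the minimum priority, which equals A's first-matching rule because rule priorities are ascending in ladder order.
import Mathlib
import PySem

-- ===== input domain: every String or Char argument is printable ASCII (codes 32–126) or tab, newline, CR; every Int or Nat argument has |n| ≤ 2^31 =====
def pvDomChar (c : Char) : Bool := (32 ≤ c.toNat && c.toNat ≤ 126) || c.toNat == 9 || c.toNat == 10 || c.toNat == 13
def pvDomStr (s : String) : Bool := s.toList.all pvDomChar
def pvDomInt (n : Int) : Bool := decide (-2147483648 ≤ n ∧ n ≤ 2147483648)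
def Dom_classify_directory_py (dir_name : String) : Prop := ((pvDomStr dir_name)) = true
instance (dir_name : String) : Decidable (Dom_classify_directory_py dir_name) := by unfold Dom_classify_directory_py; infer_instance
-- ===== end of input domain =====

-- B replaces A's ladder of per-keyword substring searches by one positional scan of the
-- lowered name with a keyword->rule-priority index, keeping the minimum priority
-- (objective: alternative); same return values everywhere.

-- ===== PORT A =====
-- Literal transliteration of A's if-ladder: each `any(kw in dir_lower for kw in [...])`
-- becomes List.any over the same literal list with PySem.Str.isIn.
def classify_directory_py (dir_name : String) : String × String :=
  let dir_lower := PySem.Str.lower dir_name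
  if ["test", "tests", "spec", "__tests__"].any (fun t => PySem.Str.isIn t dir_lower) then
    ("test", "Test coverage and quality assurance")
  else if ["config", "conf", "settings", "env"].any (fun t => PySem.Str.isIn t dir_lower) then
    ("config", "Configuration and environment setup")
  else if ["doc", "docs", "documentation"].any (fun t => PySem.Str.isIn t dir_lower) then
    ("config", "Project documentation and guides")
  else if ["src", "source", "lib", "app"].any (fun t => PySem.Str.isIn t dir_lower) then
    ("core", "Core application source code")
  else if ["component", "feature", "module", "service"].any (fun t => PySem.Str.isIn t dir_lower) then
    ("feature", "Feature implementation and business logic")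
  else if ["util", "utils", "helper", "common", "shared"].any (fun t => PySem.Str.isIn t dir_lower) then
    ("infrastructure", "Utility functions and shared code")
  else if ["api", "handler", "controller", "route"].any (fun t => PySem.Str.isIn t dir_lower) then
    ("feature", "API endpoints and request handling")
  else if ["model", "schema", "entity", "data", "db"].any (fun t => PySem.Str.isIn t dir_lower) then
    ("feature", "Data models and persistence layer")
  else if ["infra", "deploy", "docker", "k8s", "terraform"].any (fun t => PySem.Str.isIn t dir_lower) then
    ("infrastructure", "Infrastructure and deployment configuration")
  else
    ("feature", "Functionality in the " ++ dir_name ++ " module")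

-- ===== PORT B =====
-- _KEYWORD_PRIORITY of Source B: keyword -> rule priority, in the dict's insertion order.
def pvKw : List (String × Nat) :=
  [ ("test", 0), ("tests", 0), ("spec", 0), ("__tests__", 0),
    ("config", 1), ("conf", 1), ("settings", 1), ("env", 1),
    ("doc", 2), ("docs", 2), ("documentation", 2),
    ("src", 3), ("source", 3), ("lib", 3), ("app", 3),
    ("component", 4), ("feature", 4), ("module", 4), ("service", 4),
    ("util", 5), ("utils", 5), ("helper", 5), ("common", 5), ("shared", 5),
    ("api", 6), ("handler", 6), ("controller", 6), ("route", 6),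
    ("model", 7), ("schema", 7), ("entity", 7), ("data", 7), ("db", 7),
    ("infra", 8), ("deploy", 8), ("docker", 8), ("k8s", 8), ("terraform", 8) ]

-- _RESULTS of Source B.
def pvResults : List (String × String) :=
  [ ("test", "Test coverage and quality assurance"),
    ("config", "Configuration and environment setup"),
    ("config", "Project documentation and guides"),
    ("core", "Core application source code"),
    ("feature", "Feature implementation and business logic"),
    ("infrastructure", "Utility functions and shared code"),
    ("feature", "API endpoints and request handling"),
    ("feature", "Data models and persistence layer"),
    ("infrastructure", "Infrastructure and deployment configuration") ]

-- Source B's two nested loops: for each position i, `s[i:].startswith(kw)` per index entry,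
-- `best = min(best, idx)` on a match.
def pvScanB (t : List Char) : Nat :=
  (List.range t.length).foldl
    (fun best i =>
      pvKw.foldl
        (fun best kwi =>
          if PySem.Chars.startswith (t.drop i) kwi.1.toList then min best kwi.2 else best)
        best)
    9

def classify_directory_py_alt (dir_name : String) : String × String :=
  let s := PySem.Str.lower dir_name
  let best := pvScanB s.toList
  if best < 9 then pvResults.getD best ("", "")  -- `_RESULTS[best]`, index in range since best < 9
  else ("feature", "Functionality in the " ++ dir_name ++ " module")

-- ===== PRECONDITION & SPEC =====
def Spec_classify_directory_py (dir_name : String) (out : String × String) : Prop := out = classify_directory_py_alt dir_name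
instance (dir_name : String) (out : String × String) : Decidable (Spec_classify_directory_py dir_name out) := by unfold Spec_classify_directory_py; infer_instance

-- ===== CLAIM (what is proved, stated in full; the proofs are below) =====
def Claim_equal_classify_directory_py : Prop := ∀ (dir_name : String), Dom_classify_directory_py dir_name → Spec_classify_directory_py dir_name (classify_directory_py dir_name)

-- ===== LEMMAS AND PROOFS =====

-- A min-update step commutes past a whole fold of min-updates.
theorem pv_foldl_minupd_comm (K : List (String × Nat)) (P : String × Nat → Bool)
    (c : Bool) (v b : Nat) :
    K.foldl (fun b kwi => if P kwi then min b kwi.2 else b) (if c then min b v else b)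
      = (if c then min (K.foldl (fun b kwi => if P kwi then min b kwi.2 else b) b) v
         else K.foldl (fun b kwi => if P kwi then min b kwi.2 else b) b) := by
  induction K generalizing b with
  | nil => rfl
  | cons k K ih =>
      simp only [List.foldl_cons]
      rw [← ih]
      congr 1
      cases c <;> cases h : P k <;> simp [Nat.min_comm v _]

-- Two successive folds of min-updates merge into one with the disjunction of the tests.
theorem pv_foldl_minupd_merge (K : List (String × Nat)) (P Q : String × Nat → Bool) (b : Nat) :
    K.foldl (fun b kwi => if Q kwi then min b kwi.2 else b)
      (K.foldl (fun b kwi => if P kwi then min b kwi.2 else b) b)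
      = K.foldl (fun b kwi => if P kwi || Q kwi then min b kwi.2 else b) b := by
  induction K generalizing b with
  | nil => rfl
  | cons k K ih =>
      simp only [List.foldl_cons]
      rw [show (if Q k then min (K.foldl (fun b kwi => if P kwi then min b kwi.2 else b)
            (if P k then min b k.2 else b)) k.2
          else K.foldl (fun b kwi => if P kwi then min b kwi.2 else b)
            (if P k then min b k.2 else b))
        = K.foldl (fun b kwi => if P kwi then min b kwi.2 else b)
            (if Q k then min (if P k then min b k.2 else b) k.2
             else (if P k then min b k.2 else b)) from
        (pv_foldl_minupd_comm K P (Q k) k.2 (if P k then min b k.2 else b)).symm]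
      rw [ih]
      congr 1
      cases h1 : P k <;> cases h2 : Q k <;> simp

-- Folds of min-updates only depend on the test pointwise on the list's members.
theorem pv_foldl_minupd_congr (K : List (String × Nat)) (P Q : String × Nat → Bool) (b : Nat)
    (h : ∀ kwi ∈ K, P kwi = Q kwi) :
    K.foldl (fun b kwi => if P kwi then min b kwi.2 else b) b
      = K.foldl (fun b kwi => if Q kwi then min b kwi.2 else b) b := by
  induction K generalizing b with
  | nil => rfl
  | cons k K ih =>
      simp only [List.foldl_cons]
      rw [h k (List.mem_cons_self ..)]
      exact ih _ (fun kwi hk => h kwi (List.mem_cons_of_mem _ hk))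

-- A fold of min-updates whose test is false on every member is the identity.
theorem pv_foldl_minupd_false (K : List (String × Nat)) (P : String × Nat → Bool) (b : Nat)
    (h : ∀ kwi ∈ K, P kwi = false) :
    K.foldl (fun b kwi => if P kwi then min b kwi.2 else b) b = b := by
  induction K generalizing b with
  | nil => rfl
  | cons k K ih =>
      simp only [List.foldl_cons, h k (List.mem_cons_self ..)]
      exact ih _ (fun kwi hk => h kwi (List.mem_cons_of_mem _ hk))

-- The positional scan collapses to one fold over the keyword index,
-- testing existence of a matching position.
theorem pv_scan_eq_exists (t : List Char) :
    pvScanB t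
      = pvKw.foldl
          (fun b kwi =>
            if decide (∃ i, i < t.length ∧ kwi.1.toList <+: t.drop i) then min b kwi.2 else b)
          9 := by
  unfold pvScanB
  generalize 9 = b
  induction (t.length) generalizing b with
  | zero =>
      simp only [List.range_zero, List.foldl_nil]
      exact (pv_foldl_minupd_false pvKw _ b (fun kwi _ => by simp)).symm
  | succ n ih =>
      rw [List.range_succ, List.foldl_append, List.foldl_cons, List.foldl_nil, ih,
        pv_foldl_minupd_merge]
      refine pv_foldl_minupd_congr _ _ _ _ (fun kwi _ => ?_)
      rw [Bool.eq_iff_iff]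
      simp only [Bool.or_eq_true, decide_eq_true_eq, PySem.Chars.startswith_iff]
      constructor
      · rintro (⟨i, hi, hp⟩ | hp)
        · exact ⟨i, Nat.lt_succ_of_lt hi, hp⟩
        · exact ⟨n, Nat.lt_succ_self n, hp⟩
      · rintro ⟨i, hi, hp⟩
        rcases Nat.lt_succ_iff_lt_or_eq.mp hi with h | rfl
        · exact Or.inl ⟨i, h, hp⟩
        · exact Or.inr hp

-- For a nonempty keyword, having a matching position is exactly `kw in t`.
theorem pv_exists_pos_iff_isIn (kw t : List Char) (hkw : kw ≠ []) :
    (∃ i, i < t.length ∧ kw <+: t.drop i) ↔ PySem.Chars.isIn kw t = true := by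
  rw [← PySem.Chars.exists_prefix_drop_iff_isIn]
  constructor
  · rintro ⟨i, _, hp⟩; exact ⟨i, hp⟩
  · rintro ⟨j, hp⟩
    by_cases hj : j < t.length
    · exact ⟨j, hj, hp⟩
    · rw [List.drop_eq_nil_of_le (Nat.le_of_not_lt hj)] at hp
      exact absurd (List.prefix_nil.mp hp) hkw

-- The scan therefore equals the fold of min-updates driven by the 39 `kw in t` tests.
theorem pv_scan_eq_isIn (t : List Char) :
    pvScanB t
      = pvKw.foldl
          (fun b kwi => if PySem.Chars.isIn kwi.1.toList t then min b kwi.2 else b) 9 := by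
  rw [pv_scan_eq_exists]
  refine pv_foldl_minupd_congr _ _ _ _ (fun kwi hk => ?_)
  have hne : kwi.1.toList ≠ [] := by
    fin_cases hk <;> simp
  simp [pv_exists_pos_iff_isIn kwi.1.toList t hne]

-- A group of keywords sharing one priority collapses to a single `any` test.
theorem pv_group_collapse (ks : List String) (r : Nat) (t : List Char) (b : Nat) :
    (ks.map (fun k => (k, r))).foldl
        (fun b kwi => if PySem.Chars.isIn kwi.1.toList t then min b kwi.2 else b) b
      = if ks.any (fun k => PySem.Chars.isIn k.toList t) then min b r else b := by
  induction ks generalizing b with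
  | nil => rfl
  | cons k ks ih =>
      simp only [List.map_cons, List.foldl_cons, List.any_cons]
      rw [ih]
      rcases Bool.dichotomy (PySem.Chars.isIn k.toList t) with h1 | h1 <;>
        rcases Bool.dichotomy (ks.any (fun k => PySem.Chars.isIn k.toList t)) with h2 | h2 <;>
        simp only [h1, h2] <;> simp

-- The ladder and the min-scan agree for every combination of the nine group tests.
theorem pv_bool_table (a0 a1 a2 a3 a4 a5 a6 a7 a8 : Bool) (d : String × String) :
    (if a0 then ("test", "Test coverage and quality assurance")
     else if a1 then ("config", "Configuration and environment setup")
     else if a2 then ("config", "Project documentation and guides")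
     else if a3 then ("core", "Core application source code")
     else if a4 then ("feature", "Feature implementation and business logic")
     else if a5 then ("infrastructure", "Utility functions and shared code")
     else if a6 then ("feature", "API endpoints and request handling")
     else if a7 then ("feature", "Data models and persistence layer")
     else if a8 then ("infrastructure", "Infrastructure and deployment configuration")
     else d)
    = (let best :=
         (fun b => if a8 then min b 8 else b)
         ((fun b => if a7 then min b 7 else b)
         ((fun b => if a6 then min b 6 else b)
         ((fun b => if a5 then min b 5 else b)
         ((fun b => if a4 then min b 4 else b)
         ((fun b => if a3 then min b 3 else b)
         ((fun b => if a2 then min b 2 else b)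
         ((fun b => if a1 then min b 1 else b)
         ((fun b => if a0 then min b 0 else b) 9))))))));
       if best < 9 then pvResults.getD best ("", "") else d) := by
  cases a0 <;> cases a1 <;> cases a2 <;> cases a3 <;> cases a4 <;>
    cases a5 <;> cases a6 <;> cases a7 <;> cases a8 <;> rfl

-- ===== VERDICT (by name: the statement is the Claim_ definition above) =====
theorem classify_directory_py_spec : Claim_equal_classify_directory_py := by
  intro dir_name _
  show classify_directory_py dir_name = classify_directory_py_alt dir_name
  simp only [classify_directory_py, classify_directory_py_alt]
  rw [pv_scan_eq_isIn]
  rw [show pvKw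
      = (["test", "tests", "spec", "__tests__"].map (fun k => (k, 0)))
        ++ (["config", "conf", "settings", "env"].map (fun k => (k, 1)))
        ++ (["doc", "docs", "documentation"].map (fun k => (k, 2)))
        ++ (["src", "source", "lib", "app"].map (fun k => (k, 3)))
        ++ (["component", "feature", "module", "service"].map (fun k => (k, 4)))
        ++ (["util", "utils", "helper", "common", "shared"].map (fun k => (k, 5)))
        ++ (["api", "handler", "controller", "route"].map (fun k => (k, 6)))
        ++ (["model", "schema", "entity", "data", "db"].map (fun k => (k, 7)))
        ++ (["infra", "deploy", "docker", "k8s", "terraform"].map (fun k => (k, 8))) from rfl]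
  simp only [List.foldl_append, pv_group_collapse]
  simp only [PySem.Str.isIn_eq]
  exact pv_bool_table _ _ _ _ _ _ _ _ _ _
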